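-- pv_equiv track=rewrite | github.com/salmon302/DSATrain | simple_skill_tree_server.py | determine_primary_skill_area
-- ===== SOURCE A (Python) =====
-- def determine_primary_skill_area(algorithm_tags):
--     """Determine primary skill area from algorithm tags"""
--
--     skill_mapping = {
--         "array_processing": ["arrays", "two_pointers", "sliding_window", "prefix_sum"],
--         "string_algorithms": ["strings", "kmp", "rabin_karp", "manacher"],
--         "tree_algorithms": ["trees", "binary_tree", "bst", "dfs", "bfs"],
--         "graph_algorithms": ["graphs", "dijkstra", "floyd_warshall", "topological_sort"],
--         "dynamic_programming": ["dynamic_programming", "dp", "memoization"],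
--         "sorting_searching": ["sorting", "binary_search", "quicksort", "mergesort"],
--         "mathematical": ["math", "number_theory", "combinatorics", "geometry"],
--         "advanced_structures": ["segment_tree", "fenwick_tree", "union_find", "trie"]
--     }
--
--     # Count matches for each skill area
--     skill_scores = {}
--     for skill_area, keywords in skill_mapping.items():
--         score = sum(1 for tag in algorithm_tags if tag.lower() in [k.lower() for k in keywords])
--         if score > 0:
--             skill_scores[skill_area] = score
--
--     if skill_scores:
--         return max(skill_scores.items(), key=lambda x: x[1])[0]
--
--     # Fallback
--     return "general"
-- ===== SOURCE B (Python) =====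
-- def determine_primary_skill_area(algorithm_tags):
--     """Determine primary skill area from algorithm tags"""
--
--     index = {
--         "arrays": "array_processing", "two_pointers": "array_processing",
--         "sliding_window": "array_processing", "prefix_sum": "array_processing",
--         "strings": "string_algorithms", "kmp": "string_algorithms",
--         "rabin_karp": "string_algorithms", "manacher": "string_algorithms",
--         "trees": "tree_algorithms", "binary_tree": "tree_algorithms",
--         "bst": "tree_algorithms", "dfs": "tree_algorithms", "bfs": "tree_algorithms",
--         "graphs": "graph_algorithms", "dijkstra": "graph_algorithms",
--         "floyd_warshall": "graph_algorithms", "topological_sort": "graph_algorithms",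
--         "dynamic_programming": "dynamic_programming", "dp": "dynamic_programming",
--         "memoization": "dynamic_programming",
--         "sorting": "sorting_searching", "binary_search": "sorting_searching",
--         "quicksort": "sorting_searching", "mergesort": "sorting_searching",
--         "math": "mathematical", "number_theory": "mathematical",
--         "combinatorics": "mathematical", "geometry": "mathematical",
--         "segment_tree": "advanced_structures", "fenwick_tree": "advanced_structures",
--         "union_find": "advanced_structures", "trie": "advanced_structures",
--     }
--     areas = ["array_processing", "string_algorithms", "tree_algorithms",
--              "graph_algorithms", "dynamic_programming", "sorting_searching",
--              "mathematical", "advanced_structures"]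
--
--     counts = {}
--     for tag in algorithm_tags:
--         area = index.get(tag.lower())
--         if area is not None:
--             counts[area] = counts.get(area, 0) + 1
--
--     best = None
--     best_n = 0
--     for area in areas:
--         n = counts.get(area, 0)
--         if n > best_n:
--             best, best_n = area, n
--     return best if best is not None else "general"
-- ===== Notes on version B (the rewrite author's own statement) =====
-- stated objective: faster
-- what changed: Replaces the per-area rescans of the tag list (8 passes, each re-lowering every keyword list per tag) with one pass over the tags through a precomputed keyword-to-area inverted index, then one ordered scan over the areas picking the first strict maximum (matching A's first-max tie-break).
import Mathlib
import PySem

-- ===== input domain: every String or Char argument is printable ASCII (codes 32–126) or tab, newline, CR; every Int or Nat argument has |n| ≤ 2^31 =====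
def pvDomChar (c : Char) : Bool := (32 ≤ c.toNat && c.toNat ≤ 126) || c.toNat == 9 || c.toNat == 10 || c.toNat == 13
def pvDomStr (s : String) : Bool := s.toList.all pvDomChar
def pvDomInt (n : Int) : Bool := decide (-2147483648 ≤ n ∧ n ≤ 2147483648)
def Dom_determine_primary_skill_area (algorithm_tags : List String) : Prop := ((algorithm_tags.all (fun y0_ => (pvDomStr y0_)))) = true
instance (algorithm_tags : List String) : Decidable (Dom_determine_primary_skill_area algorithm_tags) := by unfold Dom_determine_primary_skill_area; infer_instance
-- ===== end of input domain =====

-- B replaces A's eight per-area rescans of the tag list by one pass over the tags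
-- through a precomputed keyword→area inverted index, then one ordered scan over the
-- areas picking the first strict maximum (same first-max tie-break as A).

-- ===== PORT A =====
def pvSkillMapping : List (String × List String) :=
  [("array_processing", ["arrays","two_pointers","sliding_window","prefix_sum"]),
   ("string_algorithms", ["strings","kmp","rabin_karp","manacher"]),
   ("tree_algorithms", ["trees","binary_tree","bst","dfs","bfs"]),
   ("graph_algorithms", ["graphs","dijkstra","floyd_warshall","topological_sort"]),
   ("dynamic_programming", ["dynamic_programming","dp","memoization"]),
   ("sorting_searching", ["sorting","binary_search","quicksort","mergesort"]),
   ("mathematical", ["math","number_theory","combinatorics","geometry"]),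
   ("advanced_structures", ["segment_tree","fenwick_tree","union_find","trie"])]

def determine_primary_skill_area (algorithm_tags : List String) : String :=
  let skill_scores : PySem.Dict String Int :=
    pvSkillMapping.foldl (fun d p =>
      let score : Int := algorithm_tags.foldl (fun acc tag =>
        if PySem.Str.lower tag ∈ p.2.map PySem.Str.lower then acc + 1 else acc) 0
      if 0 < score then d.insert p.1 score else d) PySem.Dict.empty
  if 0 < skill_scores.size then
    match PySem.List.max? skill_scores.items (fun x => x.2) with
    | some m => m.1
    | none => "general"   -- unreachable: the guard makes items nonempty
  else
    "general"

-- ===== PORT B =====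
-- the inverted index: each (lowercase) keyword mapped to its skill area (keys distinct)
def pvIndex : PySem.Dict String String := PySem.Dict.ofList
  [("arrays","array_processing"),("two_pointers","array_processing"),
   ("sliding_window","array_processing"),("prefix_sum","array_processing"),
   ("strings","string_algorithms"),("kmp","string_algorithms"),
   ("rabin_karp","string_algorithms"),("manacher","string_algorithms"),
   ("trees","tree_algorithms"),("binary_tree","tree_algorithms"),
   ("bst","tree_algorithms"),("dfs","tree_algorithms"),("bfs","tree_algorithms"),
   ("graphs","graph_algorithms"),("dijkstra","graph_algorithms"),
   ("floyd_warshall","graph_algorithms"),("topological_sort","graph_algorithms"),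
   ("dynamic_programming","dynamic_programming"),("dp","dynamic_programming"),
   ("memoization","dynamic_programming"),
   ("sorting","sorting_searching"),("binary_search","sorting_searching"),
   ("quicksort","sorting_searching"),("mergesort","sorting_searching"),
   ("math","mathematical"),("number_theory","mathematical"),
   ("combinatorics","mathematical"),("geometry","mathematical"),
   ("segment_tree","advanced_structures"),("fenwick_tree","advanced_structures"),
   ("union_find","advanced_structures"),("trie","advanced_structures")]

def pvAreas : List String :=
  ["array_processing","string_algorithms","tree_algorithms","graph_algorithms",
   "dynamic_programming","sorting_searching","mathematical","advanced_structures"]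

def determine_primary_skill_area_alt (algorithm_tags : List String) : String :=
  let counts : PySem.Dict String Int :=
    algorithm_tags.foldl (fun c tag =>
      match pvIndex.get? (PySem.Str.lower tag) with
      | some area => c.insert area (c.getD area 0 + 1)
      | none => c) PySem.Dict.empty
  let best : Option String × Int :=
    pvAreas.foldl (fun acc area =>
      let n := counts.getD area 0
      if n > acc.2 then (some area, n) else acc) (none, 0)
  match best.1 with
  | some area => area
  | none => "general"

-- ===== PRECONDITION & SPEC =====
def Spec_determine_primary_skill_area (algorithm_tags : List String) (out : String) : Prop := out = determine_primary_skill_area_alt algorithm_tags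
instance (algorithm_tags : List String) (out : String) : Decidable (Spec_determine_primary_skill_area algorithm_tags out) := by unfold Spec_determine_primary_skill_area; infer_instance

-- ===== CLAIM (what is proved, stated in full; the proofs are below) =====
def Claim_equal_determine_primary_skill_area : Prop := ∀ (algorithm_tags : List String), Dom_determine_primary_skill_area algorithm_tags → Spec_determine_primary_skill_area algorithm_tags (determine_primary_skill_area algorithm_tags)

-- ===== LEMMAS AND PROOFS =====

-- the number of tags classified into area `a` (as B classifies them)
def pvCnt (tags : List String) (a : String) : Int :=
  (tags.countP (fun t => pvIndex.get? (PySem.Str.lower t) == some a) : Nat)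

-- B's classification agrees with A's membership test, for each (area, keywords) pair
theorem pv_lower_keywords : ∀ p ∈ pvSkillMapping, p.2.map PySem.Str.lower = p.2 := by decide

theorem pv_index_items : pvIndex.items =
  [("arrays","array_processing"),("two_pointers","array_processing"),
   ("sliding_window","array_processing"),("prefix_sum","array_processing"),
   ("strings","string_algorithms"),("kmp","string_algorithms"),
   ("rabin_karp","string_algorithms"),("manacher","string_algorithms"),
   ("trees","tree_algorithms"),("binary_tree","tree_algorithms"),
   ("bst","tree_algorithms"),("dfs","tree_algorithms"),("bfs","tree_algorithms"),
   ("graphs","graph_algorithms"),("dijkstra","graph_algorithms"),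
   ("floyd_warshall","graph_algorithms"),("topological_sort","graph_algorithms"),
   ("dynamic_programming","dynamic_programming"),("dp","dynamic_programming"),
   ("memoization","dynamic_programming"),
   ("sorting","sorting_searching"),("binary_search","sorting_searching"),
   ("quicksort","sorting_searching"),("mergesort","sorting_searching"),
   ("math","mathematical"),("number_theory","mathematical"),
   ("combinatorics","mathematical"),("geometry","mathematical"),
   ("segment_tree","advanced_structures"),("fenwick_tree","advanced_structures"),
   ("union_find","advanced_structures"),("trie","advanced_structures")] := by decide

-- first-match lookup in an association list with distinct keys, as a membership test
theorem pv_assoc_lookup (s a : String) (L : List (String × String)) :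
    (L.map Prod.fst).Nodup →
    ((Option.map (fun x => x.2) (L.find? (fun p => p.1 == s)) == some a))
      = decide (s ∈ (L.filter (fun p => p.2 == a)).map Prod.fst) := by
  induction L with
  | nil => simp
  | cons q L ih =>
    intro hn
    simp only [List.map_cons, List.nodup_cons] at hn
    by_cases h : q.1 = s
    · simp only [List.find?_cons, show (q.1 == s) = true by simp [h]]
      by_cases ha : q.2 = a
      · simp [ha, h]
      · have hs : s ∉ (L.filter (fun p => p.2 == a)).map Prod.fst := by
          intro hmem
          have hsub : (L.filter (fun p => p.2 == a)) ⊆ L := fun x hx => List.mem_of_mem_filter hx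
          exact hn.1 (h ▸ List.map_subset Prod.fst hsub hmem)
        simp [ha, hs]
    · simp only [List.find?_cons, show (q.1 == s) = false by simp [h]]
      by_cases ha : q.2 = a
      · simp [ha, ih hn.2, Ne.symm h]
      · simp [ha, ih hn.2]

theorem pv_classify (p : String × List String) (hp : p ∈ pvSkillMapping) (s : String) :
    (pvIndex.get? s == some p.1) = decide (s ∈ p.2.map PySem.Str.lower) := by
  rw [pv_lower_keywords p hp]
  have hnd : (pvIndex.items.map Prod.fst).Nodup := by
    rw [pv_index_items]; decide
  fin_cases hp <;>
  · simp only [PySem.Dict.get?]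
    rw [pv_assoc_lookup _ _ _ hnd, pv_index_items]
    simp

-- A's per-area score loop counts exactly the tags B files under that area
theorem pv_score_eq (tags : List String) (p : String × List String) (hp : p ∈ pvSkillMapping) :
    (tags.foldl (fun acc tag =>
      if PySem.Str.lower tag ∈ p.2.map PySem.Str.lower then acc + 1 else acc) (0 : Int))
    = pvCnt tags p.1 := by
  rw [PySem.List.foldl_ite_add_one, pvCnt]
  rw [List.countP_congr]
  · ring
  · intro t _
    simp only [pv_classify p hp (PySem.Str.lower t)]

-- B's counter fold, characterised by pvCnt
theorem pv_counts_getD (tags : List String) (d : PySem.Dict String Int) (a : String) :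
    ((tags.foldl (fun c tag =>
        match pvIndex.get? (PySem.Str.lower tag) with
        | some area => c.insert area (c.getD area 0 + 1)
        | none => c) d).getD a 0)
    = d.getD a 0 + pvCnt tags a := by
  induction tags generalizing d with
  | nil => simp [pvCnt]
  | cons t ts ih =>
    rcases h : pvIndex.get? (PySem.Str.lower t) with _ | ar
    · simp only [List.foldl_cons, h]
      rw [ih]
      simp [pvCnt, h]
    · simp only [List.foldl_cons, h]
      rw [ih]
      by_cases hae : ar = a
      · subst hae
        rw [PySem.Dict.getD_insert_self]
        simp only [pvCnt, List.countP_cons, h, beq_self_eq_true, if_pos]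
        push_cast
        ring
      · rw [PySem.Dict.getD_insert_of_ne _ _ _ (Ne.symm hae)]
        simp [pvCnt, h, hae]

-- A's conditional-insert fold over fresh, distinct keys: the dict's item list is the
-- positive entries, in area order
theorem pv_items_foldl (f : String → Int) (ps : List (String × List String))
    (d : PySem.Dict String Int)
    (hfresh : ∀ p ∈ ps, d.contains p.1 = false)
    (hnd : (ps.map Prod.fst).Nodup) :
    (ps.foldl (fun d p => if 0 < f p.1 then d.insert p.1 (f p.1) else d) d).items
      = d.items ++ (ps.map (fun p => (p.1, f p.1))).filter (fun q => 0 < q.2) := by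
  induction ps generalizing d with
  | nil => simp
  | cons p ps ih =>
    simp only [List.map_cons, List.nodup_cons] at hnd
    by_cases hpos : 0 < f p.1
    · have hc : d.contains p.1 = false := hfresh p (by simp)
      have hins : (d.insert p.1 (f p.1)).items = d.items ++ [(p.1, f p.1)] := by
        simp [PySem.Dict.insert, hc]
      have hfr : ∀ q ∈ ps, (d.insert p.1 (f p.1)).contains q.1 = false := by
        intro q hq
        rw [PySem.Dict.contains_insert]
        have hne : q.1 ≠ p.1 := fun he => hnd.1 (he ▸ List.mem_map_of_mem hq)
        simp [hne, hfresh q (by simp [hq])]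
      simp only [List.foldl_cons, if_pos hpos]
      rw [ih (d.insert p.1 (f p.1)) hfr hnd.2, hins]
      simp [hpos]
    · simp only [List.foldl_cons, if_neg hpos]
      rw [ih d (fun q hq => hfresh q (by simp [hq])) hnd.2]
      simp [hpos]

-- bridge between B's (bestArea, bestCount) accumulator and A's running first-max
def pvRelAcc : Option (String × Int) → Option String × Int
  | none => (none, 0)
  | some (a, n) => (some a, n)

theorem pv_sel_aux (f : String → Int) (ks : List String) (m : Option (String × Int))
    (hm : ∀ a n, m = some (a, n) → 0 < n) :
    ks.foldl (fun acc area =>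
        if f area > acc.2 then (some area, f area) else acc) (pvRelAcc m)
    = pvRelAcc (((ks.map (fun a => (a, f a))).filter (fun q => 0 < q.2)).foldl
        (fun acc x =>
          match acc with
          | none => some x
          | some mm => if mm.2 < x.2 then some x else some mm) m) := by
  induction ks generalizing m with
  | nil => simp
  | cons a ks ih =>
    by_cases hpos : 0 < f a
    · simp only [List.map_cons, List.filter_cons, decide_eq_true_eq, if_pos hpos,
        List.foldl_cons]
      rcases m with _ | ⟨b, k⟩
      · simp only [pvRelAcc]
        rw [if_pos (by simpa using hpos)]
        exact ih (some (a, f a)) (by rintro c n h; cases h; exact hpos)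
      · have hk : 0 < k := hm b k rfl
        simp only [pvRelAcc]
        by_cases hlt : k < f a
        · rw [if_pos (by simpa using hlt)]
          simp only [if_pos hlt]
          exact ih (some (a, f a)) (by rintro c n h; cases h; exact hpos)
        · rw [if_neg (by simpa using hlt)]
          simp only [if_neg hlt]
          exact ih (some (b, k)) (by rintro c n h; cases h; exact hk)
    · have hstep : (if f a > (pvRelAcc m).2 then (some a, f a) else pvRelAcc m) = pvRelAcc m := by
        rcases m with _ | ⟨b, k⟩
        · simp only [pvRelAcc]
          rw [if_neg (by omega)]
        · have hk : 0 < k := hm b k rfl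
          simp only [pvRelAcc]
          rw [if_neg (by omega)]
      simp only [List.map_cons, List.filter_cons, decide_eq_true_eq, if_neg hpos,
        List.foldl_cons]
      rw [hstep]
      exact ih m hm

-- ===== VERDICT (by name: the statement is the Claim_ definition above) =====
-- the running first-max loop in A's `max(..., key=...)`, with our binder names
theorem pv_fold_eq_max? (l : List (String × Int)) :
    List.foldl (fun acc x =>
        match acc with
        | none => some x
        | some mm => if mm.2 < x.2 then some x else some mm) none l
      = PySem.List.max? l (fun x => x.2) := by
  unfold PySem.List.max?
  apply PySem.List.foldl_congr_mem
  intro acc x _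
  cases acc <;> rfl

theorem determine_primary_skill_area_spec : Claim_equal_determine_primary_skill_area := by
  intro tags _
  show determine_primary_skill_area tags = determine_primary_skill_area_alt tags
  unfold determine_primary_skill_area determine_primary_skill_area_alt
  -- rewrite A's dict build using pvCnt
  have hA : pvSkillMapping.foldl (fun d p =>
        let score : Int := tags.foldl (fun acc tag =>
          if PySem.Str.lower tag ∈ p.2.map PySem.Str.lower then acc + 1 else acc) 0
        if 0 < score then d.insert p.1 score else d) PySem.Dict.empty
      = pvSkillMapping.foldl (fun d p =>
          if 0 < pvCnt tags p.1 then d.insert p.1 (pvCnt tags p.1) else d) PySem.Dict.empty := by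
    apply PySem.List.foldl_congr_mem
    intro d p hp
    simp only [pv_score_eq tags p hp]
  rw [hA]
  have hitems := pv_items_foldl (pvCnt tags) pvSkillMapping PySem.Dict.empty
    (by intro p _; rfl) (by decide)
  -- the pair lists on the two sides coincide
  have hmap : pvSkillMapping.map (fun p => (p.1, pvCnt tags p.1))
      = pvAreas.map (fun a => (a, pvCnt tags a)) := by
    simp [pvSkillMapping, pvAreas]
  rw [hmap, show (PySem.Dict.empty : PySem.Dict String Int).items = [] from rfl,
    List.nil_append] at hitems
  -- rewrite B's counter lookups
  have hB : ∀ a, ((tags.foldl (fun c tag =>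
        match pvIndex.get? (PySem.Str.lower tag) with
        | some area => c.insert area (c.getD area 0 + 1)
        | none => c) (PySem.Dict.empty : PySem.Dict String Int)).getD a 0) = pvCnt tags a := by
    intro a
    rw [pv_counts_getD]
    have h0 : (PySem.Dict.empty : PySem.Dict String Int).getD a 0 = 0 := rfl
    rw [h0, zero_add]
  simp only [hB]
  -- selection: both reduce to the first maximum of the positive entries
  have hsel := pv_sel_aux (pvCnt tags) pvAreas none (by rintro a n h; cases h)
  simp only [pvRelAcc] at hsel
  rw [hsel, PySem.Dict.size, hitems]
  rcases hmax : (((pvAreas.map (fun a => (a, pvCnt tags a))).filter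
      (fun q => 0 < q.2)).foldl
      (fun acc x =>
        match acc with
        | none => some x
        | some mm => if mm.2 < x.2 then some x else some mm) none) with _ | ⟨a, n⟩
  · -- no positive entries: this foldl (= max?) returns none only on the empty list
    have hnil : ((pvAreas.map (fun a => (a, pvCnt tags a))).filter (fun q => 0 < q.2)) = [] := by
      exact (PySem.List.max?_eq_none_iff _ (fun x : String × Int => x.2)).mp
        ((pv_fold_eq_max? _).symm.trans hmax)
    rw [hnil]
    simp
  · have hne : ((pvAreas.map (fun a => (a, pvCnt tags a))).filter (fun q => 0 < q.2)) ≠ [] := by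
      intro hnil
      rw [hnil] at hmax
      simp at hmax
    have hlen : 0 < ((pvAreas.map (fun a => (a, pvCnt tags a))).filter
        (fun q => 0 < q.2)).length :=
      Nat.pos_of_ne_zero (fun h0 => hne (List.eq_nil_of_length_eq_zero h0))
    rw [if_pos hlen]
    have hmx : PySem.List.max? ((pvAreas.map (fun a => (a, pvCnt tags a))).filter
        (fun q => 0 < q.2)) (fun x => x.2) = some (a, n) :=
      (pv_fold_eq_max? _).symm.trans hmax
    rw [hmx, hmax]
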